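-- pv_equiv track=rewrite | github.com/Arccosecantism/ProjectEuler | Problem74.py | getDigitsStarsBars
-- ===== SOURCE A (Python) =====
-- def generateSubsets(siz, numlist):
--     #Recursively gets all siz-sized subsets of a number list: so (2,[[1,1],[2,1],[3,1]])) = [[1,2],[1,3],[2,3]]
--     #The number list is a bit confusing -- it is all the umbers you want in a pair with 1: so
--     #If you want subsets of {3,6,7}, the number list used is [[3,1],[6,1],[7,1]] -- works better for
--     #recursion
--     newlist = []
--     if siz > 0:
--         for i in range(0,len(numlist)):
--             if numlist[i][1] == 1 and len(numlist)-i >= siz :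
--                 for k in range(0,i+1):
--                     numlist[k][1] = 0
--                 nextstep = generateSubsets(siz-1, numlist)
--                 for k in nextstep:
--                     al = [numlist[i][0]]
--                     bl = list(k)
--                     cl = al+bl
--                     newlist.append(list(cl))
--                 for k in range(0,i+1):
--                     numlist[k][1] = 1
--     else:
--         newlist.append([])
--     return newlist
--
-- def getDigitsStarsBars(stars):
--     #hard to explain -- gets all possible digit lists of a certain length that can be reordered to obtain
--     #all possible numbers that are <stars> long
--     bars = 10
--     proList = [0]*(stars+bars-1)
--     nlist = [[i,1] for i in range(0,stars+bars-1)]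
--     subs = generateSubsets(bars-1, nlist)
--     digitLists = []
--     for i in subs:
--         tl = list(proList)
--         for k in i:
--             tl[k]=1
--         td = []
--         ctr = 9
--
--         requireda = False
--         requiredb = False
--         for k in range(0,len(tl)):
--             if tl[k] == 0:
--                 td.append(ctr)
--                 if ctr == 1 or ctr == 2 and not(requireda):
--                     requireda = True
--                 if ctr != 0 and not(requiredb):
--                     requiredb = True
--             else:
--                 ctr-=1
--         if stars == 7:
--             if requireda and requiredb:
--                 digitLists.append(td)
--         elif requiredb:
--             digitLists.append(td)
--     return digitLists
-- ===== SOURCE B (Python) =====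
-- def getDigitsStarsBars(stars):
--     # Generate the digit multisets directly as non-increasing sequences:
--     # pick the leading digit d ascending, then fill the rest with digits <= d.
--     def gen(n, maxd):
--         if n <= 0:
--             return [[]]
--         return [[d] + rest for d in range(maxd + 1) for rest in gen(n - 1, d)]
--     return [lst for lst in gen(stars, 9)
--             if any(lst) and (stars != 7 or 1 in lst or 2 in lst)]
-- ===== Notes on version B (the rewrite author's own statement) =====
-- stated objective: simpler
-- what changed: Replaces the stars-and-bars machinery (recursive subset generation over a mutable flag list, then a bar-to-digit counter scan per subset) by a direct recursion that generates the non-increasing digit sequences themselves, with the same post-filters.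
import Mathlib
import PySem

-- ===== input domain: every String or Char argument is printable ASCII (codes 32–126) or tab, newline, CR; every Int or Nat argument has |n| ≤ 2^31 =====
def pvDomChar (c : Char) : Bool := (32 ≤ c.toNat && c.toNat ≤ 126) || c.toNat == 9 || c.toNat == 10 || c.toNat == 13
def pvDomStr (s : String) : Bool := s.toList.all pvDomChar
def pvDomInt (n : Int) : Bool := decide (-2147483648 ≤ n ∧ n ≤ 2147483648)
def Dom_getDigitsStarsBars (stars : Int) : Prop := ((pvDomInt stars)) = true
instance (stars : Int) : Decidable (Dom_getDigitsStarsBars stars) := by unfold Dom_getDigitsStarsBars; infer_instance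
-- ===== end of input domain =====

-- B replaces A's stars-and-bars subset enumeration and bar-to-digit scan by a direct
-- recursive generation of the non-increasing digit lists (objective: simpler).


-- ===== PORT A =====
-- transliteration of generateSubsets; the Python's mutate-then-restore of the flag
-- list is rendered by passing the marked copy to the recursive call only
def markFlags (nl : List (Int × Int)) (i : Nat) : List (Int × Int) :=
  nl.mapIdx (fun k p => if k ≤ i then (p.1, 0) else p)

def generateSubsets (siz : Int) (numlist : List (Int × Int)) : List (List Int) :=
  if h : siz > 0 then
    (List.range numlist.length).foldl (fun newlist i =>
      let p := numlist.getD i (0, 0)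
      if p.2 = 1 ∧ (numlist.length : Int) - i ≥ siz then
        let nextstep := generateSubsets (siz - 1) (markFlags numlist i)
        newlist ++ nextstep.map (fun k => p.1 :: k)
      else newlist) []
  else [[]]
termination_by siz.toNat
decreasing_by simp; omega

-- body of the digit-scan loop (td/requireda/requiredb/ctr state), step for step
def stepA (tl : List Int) (st : List Int × Bool × Bool × Int) (k : Nat) :
    List Int × Bool × Bool × Int :=
  if tl.getD k 0 = 0 then
    (st.1 ++ [st.2.2.2],
     if st.2.2.2 = 1 ∨ (st.2.2.2 = 2 ∧ st.2.1 = false) then true else st.2.1,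
     if st.2.2.2 ≠ 0 ∧ st.2.2.1 = false then true else st.2.2.1,
     st.2.2.2)
  else (st.1, st.2.1, st.2.2.1, st.2.2.2 - 1)

-- per-subset body of the outer loop: build tl, then the scan loop
def subsetRes (proList : List Int) (i : List Int) : List Int × Bool × Bool × Int :=
  let tl := i.foldl (fun tl k => PySem.List.pySetD tl k 1) proList
  (List.range tl.length).foldl (stepA tl) ([], false, false, 9)

def getDigitsStarsBars (stars : Int) : List (List Int) :=
  let bars : Int := 10
  let proList : List Int := List.replicate (stars + bars - 1).toNat 0
  let nlist : List (Int × Int) := (PySem.List.pyRange 0 (stars + bars - 1) 1).map (fun i => (i, 1))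
  let subs := generateSubsets (bars - 1) nlist
  subs.foldl (fun digitLists i =>
    let res := subsetRes proList i
    if stars = 7 then
      (if res.2.1 && res.2.2.1 then digitLists ++ [res.1] else digitLists)
    else if res.2.2.1 then digitLists ++ [res.1] else digitLists) []

-- ===== PORT B =====
def genNonInc (n : Int) (maxd : Int) : List (List Int) :=
  if h : n ≤ 0 then [[]]
  else (PySem.List.pyRange 0 (maxd + 1) 1).flatMap (fun d =>
    (genNonInc (n - 1) d).map (fun rest => d :: rest))
termination_by n.toNat
decreasing_by simp at h; omega

def getDigitsStarsBars_alt (stars : Int) : List (List Int) :=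
  (genNonInc stars 9).filter (fun lst =>
    lst.any (fun d => d != 0) && (decide (stars ≠ 7) || lst.contains 1 || lst.contains 2))

-- ===== PRECONDITION & SPEC =====
def Spec_getDigitsStarsBars (stars : Int) (out : List (List Int)) : Prop := out = getDigitsStarsBars_alt stars
instance (stars : Int) (out : List (List Int)) : Decidable (Spec_getDigitsStarsBars stars out) := by unfold Spec_getDigitsStarsBars; infer_instance

-- ===== CLAIM (what is proved, stated in full; the proofs are below) =====
def Claim_equal_getDigitsStarsBars : Prop := ∀ (stars : Int), Dom_getDigitsStarsBars stars → Spec_getDigitsStarsBars stars (getDigitsStarsBars stars)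

-- ===== LEMMAS AND PROOFS =====

-- cast of a Nat list to Int
def castL (s : List Nat) : List Int := s.map (fun i : Nat => (i : Int))

theorem castL_nil : castL [] = [] := rfl
theorem castL_cons (a : Nat) (s : List Nat) : castL (a :: s) = (a : Int) :: castL s := rfl

-- abstract flag list: entries (i, flag) with flag 0 below t, 1 from t on
def NL (t n : Nat) : List (Int × Int) :=
  (List.range n).map (fun i : Nat => ((i : Int), if t ≤ i then (1 : Int) else 0))

-- spec of generateSubsets: size-siz increasing subsets of [t, n), lexicographic
def gS : Nat → Nat → Nat → List (List Nat)
  | 0, _, _ => [[]]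
  | siz + 1, t, n => (List.range n).flatMap (fun i =>
      if t ≤ i ∧ i + siz + 1 ≤ n then (gS siz (i + 1) n).map (i :: ·) else [])

-- bar positions → emitted digits over positions [t, n), counter c
def convD : List Nat → Nat → Nat → Int → List Int
  | [], t, n, c => List.replicate (n - t) c
  | i :: s', t, _n, c => List.replicate (i - t) c ++ convD s' (i + 1) _n (c - 1)

-- Nat-level clone of genNonInc
def gB : Nat → Nat → List (List Int)
  | 0, _ => [[]]
  | len + 1, m => (List.range (m + 1)).flatMap (fun d => (gB len d).map (fun r => (d : Int) :: r))

def any12 (td : List Int) : Bool := td.any (fun d => d == 1 || d == 2)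
def anyNZ (td : List Int) : Bool := td.any (fun d => d != 0)
def predB (stars : Int) (td : List Int) : Bool :=
  anyNZ td && (decide (stars ≠ 7) || td.contains 1 || td.contains 2)

theorem NL_length (t n : Nat) : (NL t n).length = n := by
  simp [NL]

theorem NL_getD (t n i : Nat) (h : i < n) :
    (NL t n).getD i (0, 0) = ((i : Int), if t ≤ i then 1 else 0) := by
  simp only [NL]
  rw [PySem.List.getD_map_range _ _ _ _ h]

theorem mapIdx_map_range {β γ : Type} (g : Nat → β) (f : Nat → β → γ) (n : Nat) :
    ((List.range n).map g).mapIdx f = (List.range n).map (fun i => f i (g i)) := by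
  apply List.ext_getElem
  · simp
  · intro i h1 h2
    simp [List.getElem_mapIdx]

theorem flatMapCongr {α β : Type} (l : List α) (f g : α → List β)
    (h : ∀ x ∈ l, f x = g x) : l.flatMap f = l.flatMap g := by
  induction l with
  | nil => rfl
  | cons a l ih => simp_all

theorem markFlags_NL (t n i : Nat) (h : t ≤ i + 1) :
    markFlags (NL t n) i = NL (i + 1) n := by
  simp only [markFlags, NL, mapIdx_map_range]
  apply List.map_congr_left
  intro a ha
  simp only [List.mem_range] at ha
  split_ifs <;> simp_all <;> omega

theorem genSubsets_eq_gS (siz t n : Nat) :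
    generateSubsets (siz : Int) (NL t n) = (gS siz t n).map castL := by
  induction siz generalizing t n with
  | zero =>
    rw [generateSubsets]
    norm_num
    simp [gS, castL_nil]
  | succ siz ih =>
    rw [generateSubsets, dif_pos (by push_cast; omega : ((siz + 1 : Nat) : Int) > 0),
        NL_length]
    have hbody := PySem.List.foldl_congr_mem (List.range n)
      (fun newlist i =>
        if ((NL t n).getD i (0, 0)).2 = 1 ∧ (((NL t n).length : Nat) : Int) - (i : Int) ≥ ((siz + 1 : Nat) : Int) then
          newlist ++ (generateSubsets (((siz + 1 : Nat) : Int) - 1) (markFlags (NL t n) i)).map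
            (fun k => ((NL t n).getD i (0, 0)).1 :: k)
        else newlist)
      (fun acc i => acc ++ (if t ≤ i ∧ i + siz + 1 ≤ n then
        (gS siz (i + 1) n).map (fun s => castL (i :: s)) else [])) []
      ?_
    · rw [NL_length] at hbody
      rw [hbody, PySem.List.foldl_append_eq_flatMap, List.nil_append]
      show _ = ((List.range n).flatMap _).map castL
      rw [List.map_flatMap]
      apply flatMapCongr
      intro i hi
      by_cases hg : t ≤ i ∧ i + siz + 1 ≤ n
      · rw [if_pos hg, if_pos hg, List.map_map]
        rfl
      · rw [if_neg hg, if_neg hg]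
        rfl
    · intro acc i hi
      simp only [List.mem_range] at hi
      simp only [NL_getD t n i hi, NL_length]
      by_cases hg : t ≤ i ∧ i + siz + 1 ≤ n
      · rw [if_pos ⟨by simp [hg.1], by push_cast; omega⟩, if_pos hg]
        have hcast : ((siz + 1 : Nat) : Int) - 1 = (siz : Int) := by push_cast; ring
        rw [hcast, markFlags_NL t n i (by omega), ih (i + 1) n, List.map_map]
        rfl
      · rw [if_neg ?_, if_neg hg]
        · simp
        · rintro ⟨h1, h2⟩
          by_cases hti : t ≤ i
          · rw [if_pos hti] at h1
            push_cast at h2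
            omega
          · rw [if_neg hti] at h1
            exact absurd h1 (by norm_num)

theorem gS_mem (siz t n : Nat) (s : List Nat) (hs : s ∈ gS siz t n) :
    s.Pairwise (· < ·) ∧ (∀ x ∈ s, t ≤ x ∧ x < n) ∧ s.length = siz := by
  induction siz generalizing t s with
  | zero =>
    simp only [gS, List.mem_singleton] at hs
    subst hs
    simp
  | succ siz ih =>
    simp only [gS, List.mem_flatMap, List.mem_range] at hs
    obtain ⟨i, hi, hs⟩ := hs
    by_cases hg : t ≤ i ∧ i + siz + 1 ≤ n
    · rw [if_pos hg] at hs
      simp only [List.mem_map] at hs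
      obtain ⟨s', hs', rfl⟩ := hs
      obtain ⟨p1, p2, p3⟩ := ih (i + 1) s' hs'
      refine ⟨?_, ?_, ?_⟩
      · exact List.Pairwise.cons (fun x hx => by have := (p2 x hx).1; omega) p1
      · intro x hx
        rcases List.mem_cons.mp hx with rfl | hx
        · exact ⟨hg.1, by omega⟩
        · have := p2 x hx; omega
      · simp [p3]
    · rw [if_neg hg] at hs
      simp at hs

theorem gS_nil (siz t n : Nat) (h : n < t + siz) (h1 : 1 ≤ siz) : gS siz t n = [] := by
  obtain ⟨siz', rfl⟩ : ∃ siz', siz = siz' + 1 := ⟨siz - 1, by omega⟩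
  simp only [gS, List.flatMap_eq_nil_iff, List.mem_range]
  intro i hi
  rw [if_neg (by omega)]

theorem foldl_set_length (s : List Nat) (tl0 : List Int) :
    ((castL s).foldl (fun tl k => PySem.List.pySetD tl k 1) tl0).length = tl0.length := by
  induction s generalizing tl0 with
  | nil => rfl
  | cons a s ih =>
    rw [castL_cons, List.foldl_cons, PySem.List.pySetD_natCast, ih]
    simp

theorem foldl_set_getD (s : List Nat) (tl0 : List Int) (k : Nat)
    (hb : ∀ x ∈ s, x < tl0.length) :
    ((castL s).foldl (fun tl k => PySem.List.pySetD tl k 1) tl0).getD k 0 =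
      if k ∈ s then 1 else tl0.getD k 0 := by
  induction s generalizing tl0 with
  | nil => simp [castL_nil]
  | cons a s ih =>
    rw [castL_cons, List.foldl_cons, PySem.List.pySetD_natCast,
      ih _ (fun x hx => by simpa using hb x (List.mem_cons_of_mem a hx))]
    by_cases hk : k ∈ s
    · simp [hk]
    · have ha : a < tl0.length := by simpa using hb a List.mem_cons_self
      by_cases hka : k = a
      · subst hka
        simp [hk, List.getD_eq_getElem?_getD, List.getElem?_set, ha]
      · simp only [hk, if_false, List.mem_cons, hka, false_or]
        simp [List.getD_eq_getElem?_getD, List.getElem?_set, Ne.symm hka]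

theorem stepA_bool (tl : List Int) (st : List Int × Bool × Bool × Int) (k : Nat) :
    stepA tl st k =
      if tl.getD k 0 = 0 then
        (st.1 ++ [st.2.2.2], st.2.1 || (st.2.2.2 == 1 || st.2.2.2 == 2),
         st.2.2.1 || (st.2.2.2 != 0), st.2.2.2)
      else (st.1, st.2.1, st.2.2.1, st.2.2.2 - 1) := by
  rcases st with ⟨td, ra, rb, c⟩
  by_cases h : tl.getD k 0 = 0
  · simp only [stepA, if_pos h]
    refine Prod.ext rfl (Prod.ext ?_ (Prod.ext ?_ rfl)) <;>
      cases ra <;> cases rb <;>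
      by_cases h1 : c = 1 <;> by_cases h2 : c = 2 <;> by_cases h0 : c = 0 <;>
      simp_all
  · simp only [stepA, if_neg h]

theorem scan_clear (m t : Nat) (tl : List Int) (td : List Int) (ra rb : Bool) (c : Int)
    (hc : ∀ k, t ≤ k → k < t + m → tl.getD k 0 = 0) :
    (List.range' t m).foldl (stepA tl) (td, ra, rb, c) =
      (td ++ List.replicate m c, ra || any12 (List.replicate m c),
       rb || anyNZ (List.replicate m c), c) := by
  induction m generalizing t td ra rb with
  | zero => simp [any12, anyNZ]
  | succ m ih =>
    rw [List.range'_succ, List.foldl_cons, stepA_bool,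
        if_pos (hc t le_rfl (by omega)),
        ih (t + 1) (td ++ [c]) _ _ (fun k hk1 hk2 => hc k (by omega) (by omega))]
    simp [any12, anyNZ, List.replicate_succ, Bool.or_assoc]

theorem scan_main (s : List Nat) (t n : Nat) (tl : List Int) (td : List Int)
    (ra rb : Bool) (c : Int)
    (hp : s.Pairwise (· < ·)) (hb : ∀ x ∈ s, t ≤ x ∧ x < n)
    (htl : ∀ k, t ≤ k → k < n → (tl.getD k 0 = 0 ↔ k ∉ s)) :
    (List.range' t (n - t)).foldl (stepA tl) (td, ra, rb, c) =
      (td ++ convD s t n c, ra || any12 (convD s t n c),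
       rb || anyNZ (convD s t n c), c - s.length) := by
  induction s generalizing t td ra rb c with
  | nil =>
    rw [scan_clear (n - t) t tl td ra rb c
      (fun k hk1 hk2 => (htl k hk1 (by omega)).mpr (by simp))]
    simp [convD]
  | cons i s' ih =>
    obtain ⟨hti, hin⟩ := hb i List.mem_cons_self
    have hpair : ∀ x ∈ s', i < x := (List.pairwise_cons.mp hp).1
    have e1 : t + 1 * (i - t) = i := by omega
    have e2 : i - t + (n - i) = n - t := by omega
    have e3 : n - i = (n - (i + 1)) + 1 := by omega
    have hsplit : List.range' t (i - t) ++ List.range' i (n - i) = List.range' t (n - t) := by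
      have h := @List.range'_append t (i - t) (n - i) 1
      rw [e1] at h
      rw [e2] at h
      exact h
    rw [← hsplit, List.foldl_append]
    have hclear : ∀ k, t ≤ k → k < t + (i - t) → tl.getD k 0 = 0 := by
      intro k hk1 hk2
      refine (htl k hk1 (by omega)).mpr ?_
      intro hmem
      rcases List.mem_cons.mp hmem with rfl | hmem'
      · omega
      · exact absurd (hpair _ hmem') (by omega)
    rw [scan_clear (i - t) t tl td ra rb c hclear, e3, List.range'_succ, List.foldl_cons,
        stepA_bool]
    have hbar : ¬ tl.getD i 0 = 0 := fun h0 => (htl i hti hin).mp h0 List.mem_cons_self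
    rw [if_neg hbar]
    have htl' : ∀ k, i + 1 ≤ k → k < n → (tl.getD k 0 = 0 ↔ k ∉ s') := by
      intro k hk1 hk2
      rw [htl k (by omega) hk2]
      simp only [List.mem_cons, not_or]
      constructor
      · exact fun h => h.2
      · exact fun h => ⟨by omega, h⟩
    rw [ih (i + 1) _ _ _ (c - 1) (List.pairwise_cons.mp hp).2
        (fun x hx => ⟨hpair x hx, (hb x (List.mem_cons_of_mem i hx)).2⟩) htl']
    refine Prod.ext ?_ (Prod.ext ?_ (Prod.ext ?_ ?_)) <;>
      simp [convD, any12, anyNZ, List.any_append, Bool.or_assoc]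
    omega

theorem subsetRes_eq (n : Nat) (s : List Nat) (hp : s.Pairwise (· < ·))
    (hb : ∀ x ∈ s, x < n) :
    subsetRes (List.replicate n (0 : Int)) (castL s) = (convD s 0 n 9, any12 (convD s 0 n 9), anyNZ (convD s 0 n 9),
      9 - (s.length : Int)) := by
  simp only [subsetRes]
  have hb' : ∀ x ∈ s, x < (List.replicate n (0 : Int)).length := by
    intro x hx
    simpa using hb x hx
  have hlen : ((castL s).foldl (fun tl k => PySem.List.pySetD tl k 1)
      (List.replicate n (0 : Int))).length = n := by
    rw [foldl_set_length]
    simp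
  rw [hlen, List.range_eq_range']
  have htl2 : ∀ k, 0 ≤ k → k < n →
      (((castL s).foldl (fun tl k => PySem.List.pySetD tl k 1)
        (List.replicate n (0 : Int))).getD k 0 = 0 ↔ k ∉ s) := by
    intro k _ hk2
    rw [foldl_set_getD s _ k hb']
    by_cases hks : k ∈ s
    · simp [hks]
    · simp [hks, List.getD_replicate (0 : Int) (hk2 : k < n)]
  have SM := scan_main s 0 n _ [] false false 9 hp
      (fun x hx => ⟨Nat.zero_le x, hb x hx⟩) htl2
  rw [Nat.sub_zero] at SM
  rw [SM]
  simp

theorem flatMap_if_filter {α β : Type} (p : α → Prop) [DecidablePred p] (F : α → List β)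
    (l : List α) :
    (l.flatMap (fun i => if p i then F i else [])) =
      (l.filter (fun i => decide (p i))).flatMap F := by
  induction l with
  | nil => simp
  | cons a l ih =>
    by_cases h : p a <;> simp [h, ih]

theorem filter_range_interval (n t c k : Nat) (hk : 1 ≤ k) (hc : c = n + 1 - k - t)
    (htk : t + k ≤ n) :
    ((List.range n).filter (fun i => decide (t ≤ i ∧ i + k ≤ n))) = List.range' t c := by
  subst hc
  have hnd1 : ((List.range n).filter (fun i => decide (t ≤ i ∧ i + k ≤ n))).Nodup :=
    List.Nodup.filter _ List.nodup_range
  have hnd2 : (List.range' t (n + 1 - k - t)).Nodup := List.nodup_range' 1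
  have hperm : ((List.range n).filter (fun i => decide (t ≤ i ∧ i + k ≤ n))).Perm
      (List.range' t (n + 1 - k - t)) := by
    rw [List.perm_ext_iff_of_nodup hnd1 hnd2]
    intro x
    simp only [List.mem_filter, List.mem_range, List.mem_range'_1, decide_eq_true_eq]
    omega
  refine List.eq_of_perm_of_sorted (le := (· < ·)) (fun a b _ _ hab hba => by omega) ?_ ?_ hperm
  · exact List.Pairwise.filter _ List.pairwise_lt_range
  · exact List.pairwise_lt_range' 1

theorem reindex (n t k : Nat) {β : Type} (F : Nat → List β) (hk : 1 ≤ k) (htk : t + k ≤ n) :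
    (List.range n).flatMap (fun i => if t ≤ i ∧ i + k ≤ n then F i else []) =
      (List.range (n + 1 - k - t)).flatMap (fun j => F (t + j)) := by
  rw [flatMap_if_filter, filter_range_interval n t (n + 1 - k - t) k hk rfl htk,
    List.range'_eq_map_range, List.flatMap_map]

theorem gB_zero (len : Nat) : gB len 0 = [List.replicate len (0 : Int)] := by
  induction len with
  | zero => simp [gB]
  | succ len ih => simp [gB, ih, List.replicate_succ]

theorem gB_rec (len m : Nat) :
    gB (len + 1) (m + 1) = gB (len + 1) m ++ (gB len (m + 1)).map ((((m : Int) + 1)) :: ·) := by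
  show (List.range (m + 1 + 1)).flatMap _ = _
  rw [List.range_succ, List.flatMap_append]
  congr 1
  simp

theorem gB_stars (len m : Nat) :
    gB len (m + 1) = (List.range (len + 1)).flatMap
      (fun j => (gB (len - j) m).map (fun r => List.replicate j ((m : Int) + 1) ++ r)) := by
  induction len with
  | zero => simp [gB]
  | succ len ih =>
    rw [List.range_succ_eq_map, List.flatMap_cons, List.flatMap_map]
    have h2 : ∀ j : Nat,
        (gB (len + 1 - (j + 1)) m).map
            (fun r => List.replicate (j + 1) ((m : Int) + 1) ++ r) =
          ((gB (len - j) m).map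
            (fun r => List.replicate j ((m : Int) + 1) ++ r)).map ((((m : Int) + 1)) :: ·) := by
      intro j
      rw [Nat.succ_sub_succ, List.map_map]
      apply List.map_congr_left
      intro r _
      simp [List.replicate_succ]
    have h3 : (List.range (len + 1)).flatMap
          (fun j => (gB (len + 1 - (j + 1)) m).map
            (fun r => List.replicate (j + 1) ((m : Int) + 1) ++ r)) =
        ((List.range (len + 1)).flatMap
          (fun j => (gB (len - j) m).map
            (fun r => List.replicate j ((m : Int) + 1) ++ r))).map ((((m : Int) + 1)) :: ·) := by
      rw [List.map_flatMap]
      apply flatMapCongr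
      intro j _
      exact h2 j
    simp only [Nat.succ_eq_add_one] at h3 ⊢
    rw [h3, ← ih, gB_rec]
    simp

theorem gS_conv_eq_gB (siz t n : Nat) (h : t + siz ≤ n) :
    (gS siz t n).map (fun s => convD s t n siz) = gB (n - t - siz) siz := by
  induction siz generalizing t with
  | zero =>
    simp [gS, convD, gB_zero]
  | succ siz ih =>
    have hcast : ((siz + 1 : Nat) : Int) = (siz : Int) + 1 := by push_cast; ring
    have key : (gS (siz + 1) t n).map (fun s => convD s t n ((siz + 1 : Nat) : Int)) =
        (List.range n).flatMap (fun i => if t ≤ i ∧ i + siz + 1 ≤ n then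
          ((gB (n - (i + 1) - siz) siz).map
            (fun r => List.replicate (i - t) ((siz : Int) + 1) ++ r)) else []) := by
      show ((List.range n).flatMap _).map _ = _
      rw [List.map_flatMap]
      apply flatMapCongr
      intro i hi
      by_cases hg : t ≤ i ∧ i + siz + 1 ≤ n
      · rw [if_pos hg, if_pos hg, List.map_map]
        have step1 : (gS siz (i + 1) n).map
            ((fun s => convD s t n ((siz + 1 : Nat) : Int)) ∘ (i :: ·)) =
            (gS siz (i + 1) n).map
              (fun s' => List.replicate (i - t) ((siz : Int) + 1) ++ convD s' (i + 1) n (siz : Int)) := by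
          apply List.map_congr_left
          intro s' _
          show convD (i :: s') t n ((siz + 1 : Nat) : Int) = _
          simp only [convD, hcast]
          congr 2
          ring
        rw [step1]
        have step2 : (gS siz (i + 1) n).map
            (fun s' => List.replicate (i - t) ((siz : Int) + 1) ++ convD s' (i + 1) n (siz : Int)) =
            ((gS siz (i + 1) n).map (fun s' => convD s' (i + 1) n (siz : Int))).map
              (fun r => List.replicate (i - t) ((siz : Int) + 1) ++ r) := by
          rw [List.map_map]
          rfl
        rw [step2, ih (i + 1) (by omega)]
      · rw [if_neg hg, if_neg hg]
        rfl
    rw [key]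
    have R := reindex n t (siz + 1)
      (fun i => (gB (n - (i + 1) - siz) siz).map
        (fun r => List.replicate (i - t) ((siz : Int) + 1) ++ r)) (by omega) h
    rw [show (List.range n).flatMap
        (fun i => if t ≤ i ∧ i + siz + 1 ≤ n then
          (gB (n - (i + 1) - siz) siz).map
            (fun r => List.replicate (i - t) ((siz : Int) + 1) ++ r) else []) =
      (List.range n).flatMap
        (fun i => if t ≤ i ∧ i + (siz + 1) ≤ n then
          (gB (n - (i + 1) - siz) siz).map
            (fun r => List.replicate (i - t) ((siz : Int) + 1) ++ r) else []) from rfl, R,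
      gB_stars (n - t - (siz + 1)) siz,
      show n + 1 - (siz + 1) - t = (n - t - (siz + 1)) + 1 by omega]
    apply flatMapCongr
    intro j hj
    simp only [List.mem_range] at hj
    simp only [show t + j - t = j from by omega,
      show n - (t + j + 1) - siz = n - t - (siz + 1) - j from by omega]

theorem genNonInc_eq_gB (len m : Nat) : genNonInc (len : Int) (m : Int) = gB len m := by
  induction len generalizing m with
  | zero =>
    rw [genNonInc]
    norm_num [gB]
  | succ len ih =>
    rw [genNonInc, dif_neg (by push_cast; omega : ¬ ((len + 1 : Nat) : Int) ≤ 0),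
        PySem.List.pyRange_one]
    simp only [sub_zero, zero_add]
    have hm : ((m : Int) + 1).toNat = m + 1 := by omega
    rw [hm, List.flatMap_map]
    show _ = gB (len + 1) m
    rw [gB]
    apply flatMapCongr
    intro k _
    have hl : ((len + 1 : Nat) : Int) - 1 = ((len : Nat) : Int) := by push_cast; ring
    rw [hl, ih k]

theorem any12_eq_contains (td : List Int) :
    any12 td = (td.contains 1 || td.contains 2) := by
  rw [Bool.eq_iff_iff]
  simp only [any12, List.any_eq_true, Bool.or_eq_true, beq_iff_eq, List.contains_iff_mem]
  aesop

theorem nlist_NL (b : Int) :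
    (PySem.List.pyRange 0 b 1).map (fun i => (i, (1 : Int))) = NL 0 b.toNat := by
  rw [PySem.List.pyRange_one, List.map_map, NL]
  simp only [sub_zero]
  apply List.map_congr_left
  intro i _
  simp

-- ===== VERDICT (by name: the statement is the Claim_ definition above) =====
theorem getDigitsStarsBars_spec : Claim_equal_getDigitsStarsBars := by
  intro stars _
  unfold Spec_getDigitsStarsBars
  simp only [getDigitsStarsBars, getDigitsStarsBars_alt]
  rw [show (10 : Int) - 1 = ((9 : Nat) : Int) from by norm_num,
      nlist_NL (stars + 10 - 1),
      genSubsets_eq_gS 9 0 ((stars + 10 - 1).toNat)]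
  by_cases hneg : stars < 0
  · rw [gS_nil 9 0 _ (by omega) (by omega), genNonInc, dif_pos (by omega : stars ≤ 0)]
    simp
  · push_neg at hneg
    set n := (stars + 10 - 1).toNat with hn
    have hG := gS_conv_eq_gB 9 0 n (by omega)
    simp only [Nat.cast_ofNat] at hG
    have hB : genNonInc stars 9 = gB (n - 0 - 9) 9 := by
      rw [show n - 0 - 9 = stars.toNat from by omega, ← genNonInc_eq_gB]
      simp only [Nat.cast_ofNat]
      rw [Int.toNat_of_nonneg hneg]
    rw [hB, ← hG]
    by_cases h7 : stars = 7
    · simp only [h7, eq_self_iff_true, if_true]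
      rw [PySem.List.foldl_append_if
          (fun i => (subsetRes (List.replicate n 0) i).2.1 &&
            (subsetRes (List.replicate n 0) i).2.2.1)
          (fun i => (subsetRes (List.replicate n 0) i).1) _ [],
        List.nil_append, List.filter_map, List.map_map, List.filter_map]
      have hfilter : (gS 9 0 n).filter
          ((fun i => (subsetRes (List.replicate n 0) i).2.1 &&
            (subsetRes (List.replicate n 0) i).2.2.1) ∘ castL) =
          (gS 9 0 n).filter (fun s => predB 7 (convD s 0 n 9)) := by
        apply List.filter_congr
        intro s hs
        obtain ⟨hpw, hbd, _⟩ := gS_mem 9 0 n s hs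
        simp only [Function.comp_apply]
        rw [subsetRes_eq n s hpw (fun x hx => (hbd x hx).2)]
        simp only [predB]
        rw [any12_eq_contains]
        simp [Bool.and_comm]
      rw [hfilter]
      apply List.map_congr_left
      intro s hs
      have hm := List.mem_of_mem_filter hs
      obtain ⟨hpw, hbd, _⟩ := gS_mem 9 0 n s hm
      simp only [Function.comp_apply]
      rw [subsetRes_eq n s hpw (fun x hx => (hbd x hx).2)]
    · simp only [if_neg h7]
      rw [PySem.List.foldl_append_if
          (fun i => (subsetRes (List.replicate n 0) i).2.2.1)
          (fun i => (subsetRes (List.replicate n 0) i).1) _ [],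
        List.nil_append, List.filter_map, List.map_map, List.filter_map]
      have hfilter : (gS 9 0 n).filter
          ((fun i => (subsetRes (List.replicate n 0) i).2.2.1) ∘ castL) =
          (gS 9 0 n).filter (fun s => predB stars (convD s 0 n 9)) := by
        apply List.filter_congr
        intro s hs
        obtain ⟨hpw, hbd, _⟩ := gS_mem 9 0 n s hs
        simp only [Function.comp_apply]
        rw [subsetRes_eq n s hpw (fun x hx => (hbd x hx).2)]
        simp [predB, h7]
      rw [hfilter]
      apply List.map_congr_left
      intro s hs
      have hm := List.mem_of_mem_filter hs
      obtain ⟨hpw, hbd, _⟩ := gS_mem 9 0 n s hm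
      simp only [Function.comp_apply]
      rw [subsetRes_eq n s hpw (fun x hx => (hbd x hx).2)]
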